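-- pv_equiv track=rewrite | github.com/zacheen/python | python_learn/Algorithm_template/Graph_dir.py | cut_all_branch
-- ===== SOURCE A (Python) =====
-- from collections import Counter, deque, defaultdict
--
-- def link(relation, len_n = -1):
--     # method 1
--     li = defaultdict(list)
--     # method 2
--     if len_n == -1 :
--         len_n = max(max(n1,n2) for n1,n2 in relation) + 1
--     li = [[] for _ in range(len_n)]
--
--     # build
--     for n1,n2 in relation :
--         li[n1].append(n2)
--     return li
--
-- def cut_all_branch(links, len_n):
--     deg = [0] * len_n
--     for n1,n2 in links:
--         deg[n2] += 1  # 統計基環樹每個節點的入度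
--     li = link(links, len_n)
--     end_point = [i for i, d in enumerate(deg) if d == 0]
--     while end_point:  # 拓樸排序，剪掉圖上所有樹枝
--         now_n = end_point.pop()
--         for nei_n in li[now_n] :
--             deg[nei_n] -= 1
--             if deg[nei_n] == 0:
--                 end_point.append(nei_n)
--
--     # return cycle (回傳全部形成 cycle 的點)
--     return [i for i, l in enumerate(deg) if l > 0]
-- ===== SOURCE B (Python) =====
-- def cut_all_branch(links, len_n):
--     deg = [0] * len_n
--     adj = [[] for _ in range(len_n)]
--     for a, b in links:
--         deg[b] += 1
--         adj[a].append(b)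
--     removed = [False] * len_n
--     while True:
--         zeros = [i for i in range(len_n) if not removed[i] and deg[i] == 0]
--         if not zeros:
--             break
--         for i in zeros:
--             removed[i] = True
--             for j in adj[i]:
--                 deg[j] -= 1
--     return [i for i in range(len_n) if deg[i] > 0]
-- ===== Notes on version B (the rewrite author's own statement) =====
-- stated objective: alternative
-- what changed: A peels zero-in-degree nodes with a LIFO worklist that pushes each newly zero neighbour once per edge; B instead runs a round-based fixpoint that repeatedly rescans all nodes for unremoved in-degree-0 nodes and removes them a whole batch at a time, with no worklist.
-- crash fix: On links = [] with len_n = -1, A raises ValueError (max() of an empty sequence inside its link() helper) while B returns []. — e.g. on cut_all_branch([], -1): A raises ValueError, B returns []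
import Mathlib
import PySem

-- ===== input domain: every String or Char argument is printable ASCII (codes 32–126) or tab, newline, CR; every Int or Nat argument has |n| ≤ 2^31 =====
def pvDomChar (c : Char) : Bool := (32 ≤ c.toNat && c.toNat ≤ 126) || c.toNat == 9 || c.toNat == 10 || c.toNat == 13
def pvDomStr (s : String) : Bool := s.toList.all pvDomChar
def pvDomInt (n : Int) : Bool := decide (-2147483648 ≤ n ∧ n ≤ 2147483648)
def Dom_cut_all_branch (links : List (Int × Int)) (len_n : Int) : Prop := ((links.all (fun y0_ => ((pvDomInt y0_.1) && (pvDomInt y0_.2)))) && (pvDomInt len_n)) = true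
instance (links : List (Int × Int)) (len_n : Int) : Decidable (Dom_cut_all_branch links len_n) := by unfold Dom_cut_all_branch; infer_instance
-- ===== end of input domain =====

-- B replaces A's LIFO worklist (pop / push of newly zero-in-degree nodes) by a round-based
-- fixpoint that repeatedly rescans all nodes for unremoved in-degree-0 nodes; objective: alternative.

-- ===== PORT A =====
-- helper `link` of A; the `len_n == -1` recomputation branch raises ValueError on an empty
-- relation in Python (max of empty); Pre_ excludes len_n = -1, so the `.getD 0` default below is unreachable.
def pvLink (relation : List (Int × Int)) (len_n : Int) : List (List Int) :=
  let len_n2 : Int := if len_n = -1 then ((relation.map (fun p => max p.1 p.2)).max?.getD 0) + 1 else len_n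
  let li : List (List Int) := (List.range len_n2.toNat).map (fun _ => [])
  relation.foldl (fun li p => PySem.List.pySetD li p.1 (PySem.List.pyGetD li p.1 [] ++ [p.2])) li

-- A's `while end_point:` loop; one fuel per pop (`len_n.toNat` pops suffice: each pop removes a
-- distinct node; proved in the lemmas below — at fuel 0 the worklist is provably empty under Pre_).
def pvLoopA (li : List (List Int)) : Nat → List Int → List Int → List Int
  | 0, deg, _ => deg
  | fuel+1, deg, end_point =>
    if end_point = [] then deg
    else
      let now_n := PySem.List.pyGetD end_point (-1) 0      -- end_point.pop()
      let ep0 := end_point.dropLast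
      let st := (PySem.List.pyGetD li now_n []).foldl
        (fun (s : List Int × List Int) nei =>
          let d := PySem.List.pyGetD s.1 nei 0 - 1
          let deg2 := PySem.List.pySetD s.1 nei d
          if d = 0 then (deg2, s.2 ++ [nei]) else (deg2, s.2)) (deg, ep0)
      pvLoopA li fuel st.1 st.2

def cut_all_branch (links : List (Int × Int)) (len_n : Int) : List Int :=
  let deg : List Int := links.foldl
    (fun deg p => PySem.List.pySetD deg p.2 (PySem.List.pyGetD deg p.2 0 + 1))
    (List.replicate len_n.toNat 0)
  let li := pvLink links len_n
  let end_point := ((PySem.List.enumerate deg).filter (fun p => decide (p.2 = 0))).map (·.1)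
  let degF := pvLoopA li len_n.toNat deg end_point
  ((PySem.List.enumerate degF).filter (fun p => decide (0 < p.2))).map (·.1)

-- ===== PORT B =====
-- B's `while True:` round loop; one fuel per round (`len_n.toNat + 1` rounds suffice: every
-- round before the last removes at least one node; proved in the lemmas below).
def pvLoopB (adj : List (List Int)) (len_n : Int) : Nat → List Int → List Bool → List Int
  | 0, deg, _ => deg
  | fuel+1, deg, removed =>
    let zeros := (PySem.List.pyRange 0 len_n 1).filter
        (fun i => !(PySem.List.pyGetD removed i false) && decide (PySem.List.pyGetD deg i 0 = 0))
    if zeros = [] then deg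
    else
      let st := zeros.foldl (fun (s : List Int × List Bool) i =>
          ((PySem.List.pyGetD adj i []).foldl
              (fun d j => PySem.List.pySetD d j (PySem.List.pyGetD d j 0 - 1)) s.1,
           PySem.List.pySetD s.2 i true)) (deg, removed)
      pvLoopB adj len_n fuel st.1 st.2

def cut_all_branch_alt (links : List (Int × Int)) (len_n : Int) : List Int :=
  let n := len_n.toNat
  let st := links.foldl (fun (s : List Int × List (List Int)) p =>
      (PySem.List.pySetD s.1 p.2 (PySem.List.pyGetD s.1 p.2 0 + 1),
       PySem.List.pySetD s.2 p.1 (PySem.List.pyGetD s.2 p.1 [] ++ [p.2])))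
      (List.replicate n 0, (List.range n).map (fun _ => []))
  let degF := pvLoopB st.2 len_n (n+1) st.1 (List.replicate n false)
  (PySem.List.pyRange 0 len_n 1).filter (fun i => decide (0 < PySem.List.pyGetD degF i 0))

-- ===== PRECONDITION & SPEC =====
-- Pre_ excludes exactly the inputs where A raises: any link endpoint outside Python's index
-- range [-len_n, len_n) for the degree list (IndexError), and len_n = -1 (A's `link` then
-- calls max() over the links, raising ValueError when links is empty, IndexError otherwise).
def Pre_cut_all_branch (links : List (Int × Int)) (len_n : Int) : Prop :=
  len_n ≠ -1 ∧ ∀ p ∈ links, (-len_n ≤ p.1 ∧ p.1 < len_n ∧ -len_n ≤ p.2 ∧ p.2 < len_n)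
instance (links : List (Int × Int)) (len_n : Int) : Decidable (Pre_cut_all_branch links len_n) := by
  unfold Pre_cut_all_branch; infer_instance

def pvWitness_cut_all_branch : (List (Int × Int)) × Int := ([(0,1),(1,2),(2,1)], 3)

-- On links = [] with len_n = -1, A raises ValueError (max() of an empty sequence) while B returns [].
def Raises_cut_all_branch (links : List (Int × Int)) (len_n : Int) : Prop :=
  links = [] ∧ len_n = -1
instance (links : List (Int × Int)) (len_n : Int) : Decidable (Raises_cut_all_branch links len_n) := by
  unfold Raises_cut_all_branch; infer_instance
def pvRaiseWitness_cut_all_branch : (List (Int × Int)) × Int := ([], -1)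
def pvRaiseWitnessOut_cut_all_branch : List Int := []

def Spec_cut_all_branch (links : List (Int × Int)) (len_n : Int) (out : List Int) : Prop := out = cut_all_branch_alt links len_n
instance (links : List (Int × Int)) (len_n : Int) (out : List Int) : Decidable (Spec_cut_all_branch links len_n out) := by unfold Spec_cut_all_branch; infer_instance

-- ===== CLAIM (what is proved, stated in full; the proofs are below) =====
def Claim_equal_cut_all_branch : Prop := ∀ (links : List (Int × Int)) (len_n : Int), Dom_cut_all_branch links len_n → Pre_cut_all_branch links len_n → Spec_cut_all_branch links len_n (cut_all_branch links len_n)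
def Claim_raises_cut_all_branch : Prop := (∀ (links : List (Int × Int)) (len_n : Int), Dom_cut_all_branch links len_n → Raises_cut_all_branch links len_n → ¬ Pre_cut_all_branch links len_n) ∧ (Dom_cut_all_branch (pvRaiseWitness_cut_all_branch.1) (pvRaiseWitness_cut_all_branch.2) ∧ Raises_cut_all_branch (pvRaiseWitness_cut_all_branch.1) (pvRaiseWitness_cut_all_branch.2) ∧ cut_all_branch_alt (pvRaiseWitness_cut_all_branch.1) (pvRaiseWitness_cut_all_branch.2) = pvRaiseWitnessOut_cut_all_branch)

-- ===== LEMMAS AND PROOFS =====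

-- Python's index normalisation for a list of length n (valid range -n ≤ i < n).
def pvPidx (n : Nat) (i : Int) : Nat := if 0 ≤ i then i.toNat else n - (-i).toNat

-- links with both endpoints normalised to Nat node ids < n
def pvNormL (n : Nat) (links : List (Int × Int)) : List (Nat × Nat) :=
  links.map (fun p => (pvPidx n p.1, pvPidx n p.2))

-- remaining in-degree of node i once the nodes of S have been peeled:
-- the number of links into i whose source is still outside S
def pvDegA (L : List (Nat × Nat)) (S : Finset Nat) (i : Nat) : Nat :=
  (L.filter (fun p => decide (p.2 = i ∧ p.1 ∉ S))).length

-- the degree list both programs maintain, as a function of the peeled set S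
def pvMdeg (L : List (Nat × Nat)) (n : Nat) (S : Finset Nat) : List Int :=
  (List.range n).map (fun k => ((pvDegA L S k : Nat) : Int))

-- sets reachable by valid peeling steps (remove a node of remaining in-degree 0)
inductive PvPeel (L : List (Nat × Nat)) (n : Nat) : Finset Nat → Prop
  | nil : PvPeel L n ∅
  | step {S x} : PvPeel L n S → x < n → x ∉ S → pvDegA L S x = 0 → PvPeel L n (insert x S)

-- no further peeling step is possible
def pvClosed (L : List (Nat × Nat)) (n : Nat) (S : Finset Nat) : Prop :=
  ∀ i < n, pvDegA L S i = 0 → i ∈ S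

-- the worklist / scan frontier: unpeeled nodes of remaining in-degree 0
def pvZ (L : List (Nat × Nat)) (n : Nat) (S : Finset Nat) : Finset Nat :=
  (Finset.range n).filter (fun i => i ∉ S ∧ pvDegA L S i = 0)

-- raw (Int-valued) adjacency list entry built by both programs
def pvRawAdj (n : Nat) (links : List (Int × Int)) (x : Nat) : List Int :=
  (links.filter (fun p => decide (pvPidx n p.1 = x))).map (fun p => p.2)

theorem pvDegA_mono (L : List (Nat × Nat)) {S T : Finset Nat} (h : S ⊆ T) (i : Nat) :
    pvDegA L T i ≤ pvDegA L S i := by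
  apply List.Sublist.length_le
  apply List.monotone_filter_right
  intro p hp
  simp only [decide_eq_true_eq] at *
  exact ⟨hp.1, fun hs => hp.2 (h hs)⟩

theorem pvPeel_subset (L : List (Nat × Nat)) (n : Nat) {S T : Finset Nat}
    (hS : PvPeel L n S) (hT : pvClosed L n T) : S ⊆ T := by
  induction hS with
  | nil => simp
  | @step S x _ hx hxS hdeg ih =>
    refine Finset.insert_subset ?_ ih
    exact hT x hx (Nat.le_antisymm (hdeg ▸ pvDegA_mono L ih x) (Nat.zero_le _))

theorem pvPeel_subset_range (L : List (Nat × Nat)) (n : Nat) {S : Finset Nat}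
    (hS : PvPeel L n S) : ∀ x ∈ S, x < n := by
  induction hS with
  | nil => simp
  | @step S x _ hx hxS hdeg ih =>
    intro y hy
    rcases Finset.mem_insert.mp hy with h | h
    · exact h ▸ hx
    · exact ih y h

-- every peeled node has remaining in-degree 0
theorem pvPeel_deg_zero (L : List (Nat × Nat)) (n : Nat) {S : Finset Nat}
    (hS : PvPeel L n S) : ∀ x ∈ S, pvDegA L S x = 0 := by
  induction hS with
  | nil => simp
  | @step S x _ hx hxS hdeg ih =>
    intro y hy
    have hsub : S ⊆ insert x S := Finset.subset_insert x S
    rcases Finset.mem_insert.mp hy with h | h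
    · subst h
      exact Nat.le_antisymm (hdeg ▸ pvDegA_mono L hsub y) (Nat.zero_le _)
    · exact Nat.le_antisymm ((ih y h) ▸ pvDegA_mono L hsub y) (Nat.zero_le _)

theorem pvUnique (L : List (Nat × Nat)) (n : Nat) {S T : Finset Nat}
    (hS : PvPeel L n S) (hS' : pvClosed L n S) (hT : PvPeel L n T) (hT' : pvClosed L n T) :
    S = T :=
  Finset.Subset.antisymm (pvPeel_subset L n hS hT') (pvPeel_subset L n hT hS')

-- ---- bridge lemmas: PySem indexing on a length-n list vs pvPidx ----

theorem pvPidx_natCast (n k : Nat) : pvPidx n (k : Int) = k := by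
  simp [pvPidx]

theorem pvPidx_lt {n : Nat} {i : Int} (h1 : -(n:Int) ≤ i) (h2 : i < (n:Int)) :
    pvPidx n i < n := by
  unfold pvPidx
  split
  · omega
  · omega

theorem pvPyIdx_eq {n : Nat} {i : Int} (h1 : -(n:Int) ≤ i) (h2 : i < (n:Int)) :
    PySem.List.pyIdx? n i = some (pvPidx n i) := by
  simp only [PySem.List.pyIdx?, pvPidx]
  split <;> simp_all

theorem pvPyGetD_eq {α : Type} {n : Nat} {i : Int} (xs : List α) (d : α)
    (hlen : xs.length = n) (h1 : -(n:Int) ≤ i) (h2 : i < (n:Int)) :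
    PySem.List.pyGetD xs i d = xs.getD (pvPidx n i) d := by
  simp only [PySem.List.pyGetD, PySem.List.pyGet?, hlen, pvPyIdx_eq h1 h2, Option.bind_some,
    List.getD_eq_getElem?_getD]

theorem pvPySetD_eq {α : Type} {n : Nat} {i : Int} (xs : List α) (v : α)
    (hlen : xs.length = n) (h1 : -(n:Int) ≤ i) (h2 : i < (n:Int)) :
    PySem.List.pySetD xs i v = xs.set (pvPidx n i) v := by
  simp only [PySem.List.pySetD, PySem.List.pySet?, hlen, pvPyIdx_eq h1 h2, Option.map_some,
    Option.getD_some]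

theorem pvSet_map_range {α : Type} {n j : Nat} (f : Nat → α) (v : α) (hj : j < n) :
    ((List.range n).map f).set j v = (List.range n).map (fun k => if k = j then v else f k) := by
  apply List.ext_getElem
  · simp
  · intro k hk hk'
    simp only [List.length_set, List.length_map, List.length_range] at hk
    rw [List.getElem_set]
    simp only [List.getElem_map, List.getElem_range]
    split
    · simp_all
    · rw [if_neg (by omega)]

theorem pvGetD_map_range {α : Type} {n j : Nat} (f : Nat → α) (d : α) (hj : j < n) :
    ((List.range n).map f).getD j d = f j :=
  PySem.List.getD_map_range f n j d hj

-- ---- generic lemma: a fold that updates one cell per element, over a length-n map-of-range ----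
theorem pvFoldUpd {α β : Type} (dflt : α) (F : β → α → α) (sel : β → Int) (n : Nat) :
    ∀ (l : List β), (∀ b ∈ l, -(n:Int) ≤ sel b ∧ sel b < (n:Int)) → ∀ f : Nat → α,
    l.foldl (fun s b => PySem.List.pySetD s (sel b) (F b (PySem.List.pyGetD s (sel b) dflt)))
        ((List.range n).map f)
    = (List.range n).map
        (fun k => (l.filter (fun b => decide (pvPidx n (sel b) = k))).foldl (fun a b => F b a) (f k)) := by
  intro l
  induction l with
  | nil => intro _ f; simp
  | cons b l ih =>
    intro hl f
    have hb := hl b (List.mem_cons_self ..)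
    have hj : pvPidx n (sel b) < n := pvPidx_lt hb.1 hb.2
    simp only [List.foldl_cons]
    rw [pvPyGetD_eq _ _ (by simp) hb.1 hb.2, pvPySetD_eq _ _ (by simp) hb.1 hb.2,
      pvGetD_map_range f dflt hj, pvSet_map_range f _ hj,
      ih (fun c hc => hl c (List.mem_cons_of_mem _ hc))]
    apply List.map_congr_left
    intro k hk
    simp only [List.filter_cons]
    by_cases hsel : pvPidx n (sel b) = k
    · subst hsel
      simp
    · rw [decide_eq_false hsel]
      simp [Ne.symm hsel]

-- ---- counting lemmas ----

theorem pvFoldAdd (l : List (Int × Int)) : ∀ v : Int,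
    l.foldl (fun a _ => a + 1) v = v + l.length := by
  induction l with
  | nil => simp
  | cons b l ih => intro v; simp [ih]; push_cast; ring

theorem pvFoldSub (l : List Int) : ∀ v : Int,
    l.foldl (fun a _ => a - 1) v = v - l.length := by
  induction l with
  | nil => simp
  | cons b l ih => intro v; simp [ih]; push_cast; ring

theorem pvFoldApp {α β : Type} (g : β → α) (l : List β) : ∀ v : List α,
    l.foldl (fun a b => a ++ [g b]) v = v ++ l.map g := by
  induction l with
  | nil => simp
  | cons b l ih => intro v; simp [ih]

theorem pvReplicate {α : Type} (n : Nat) (c : α) :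
    List.replicate n c = (List.range n).map (fun _ => c) := by
  apply List.ext_getElem <;> simp

theorem pvDegA_empty (L : List (Nat × Nat)) (k : Nat) :
    pvDegA L ∅ k = (L.filter (fun p => decide (p.2 = k))).length := by
  unfold pvDegA
  congr 1
  apply List.filter_congr
  intro p _
  simp

-- splitting the remaining in-degree at an unpeeled node x
theorem pvDegA_insert (L : List (Nat × Nat)) {S : Finset Nat} {x : Nat} (hx : x ∉ S) (k : Nat) :
    pvDegA L S k
      = pvDegA L (insert x S) k + (L.filter (fun p => decide (p.1 = x ∧ p.2 = k))).length := by
  induction L with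
  | nil => simp [pvDegA]
  | cons p L ih =>
    simp only [pvDegA, List.filter_cons] at ih ⊢
    by_cases h1 : p.2 = k <;> by_cases h2 : p.1 = x <;> by_cases h3 : p.1 ∈ S
    all_goals first
      | (simp [h1, h2, h3, hx, Finset.mem_insert] at ih ⊢; omega)
      | (simp [h1, h2, h3, hx, Finset.mem_insert] at ih ⊢)
      | exact absurd (h2 ▸ h3) hx

-- the normalised adjacency entry is the normalised targets of the raw adjacency entry
theorem pvRawAdjN (n : Nat) (links : List (Int × Int)) (x : Nat) :
    (pvRawAdj n links x).map (pvPidx n)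
      = ((pvNormL n links).filter (fun p => decide (p.1 = x))).map (fun p => p.2) := by
  simp [pvRawAdj, pvNormL, List.filter_map, Function.comp_def]

theorem pvCount_aux (M : List (Nat × Nat)) (x k : Nat) :
    ((M.filter (fun p => decide (p.1 = x))).map (fun p => p.2)).count k
      = (M.filter (fun p => decide (p.1 = x ∧ p.2 = k))).length := by
  induction M with
  | nil => simp
  | cons p M ih =>
    by_cases h1 : p.1 = x <;> by_cases h2 : p.2 = k <;>
      simp [List.filter_cons, h1, h2, List.count_cons, ih]

theorem pvCount_adjN (n : Nat) (links : List (Int × Int)) (x k : Nat) :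
    ((pvRawAdj n links x).map (pvPidx n)).count k
      = ((pvNormL n links).filter (fun p => decide (p.1 = x ∧ p.2 = k))).length := by
  rw [pvRawAdjN, pvCount_aux]

-- the per-node effect of peeling x: its out-edges' decrements
theorem pvMdeg_dec (n : Nat) (links : List (Int × Int)) {S : Finset Nat} {x : Nat}
    (hx : x ∉ S) (k : Nat) :
    (pvDegA (pvNormL n links) S k : Int)
        - (((pvRawAdj n links x).map (pvPidx n)).count k : Int)
      = (pvDegA (pvNormL n links) (insert x S) k : Int) := by
  rw [pvCount_adjN]
  have := pvDegA_insert (pvNormL n links) hx k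
  omega

-- ---- the two build folds ----

theorem pvBuildDeg (n : Nat) (links : List (Int × Int))
    (hl : ∀ p ∈ links, -(n:Int) ≤ p.2 ∧ p.2 < (n:Int)) :
    links.foldl (fun deg p => PySem.List.pySetD deg p.2 (PySem.List.pyGetD deg p.2 0 + 1))
        (List.replicate n (0:Int))
      = pvMdeg (pvNormL n links) n ∅ := by
  rw [pvReplicate, pvFoldUpd 0 (fun _ a => a + 1) (fun p => p.2) n links hl]
  apply List.map_congr_left
  intro k _
  rw [pvFoldAdd, pvDegA_empty]
  have : (pvNormL n links).filter (fun p => decide (p.2 = k))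
      = (links.filter (fun p => decide (pvPidx n p.2 = k))).map
          (fun p => (pvPidx n p.1, pvPidx n p.2)) := by
    simp [pvNormL, List.filter_map, Function.comp_def]
  rw [this, List.length_map]
  omega

theorem pvBuildAdj (n : Nat) (links : List (Int × Int))
    (hl : ∀ p ∈ links, -(n:Int) ≤ p.1 ∧ p.1 < (n:Int)) :
    links.foldl (fun li p => PySem.List.pySetD li p.1 (PySem.List.pyGetD li p.1 [] ++ [p.2]))
        ((List.range n).map (fun _ => ([] : List Int)))
      = (List.range n).map (pvRawAdj n links) := by
  rw [pvFoldUpd [] (fun p a => a ++ [p.2]) (fun p => p.1) n links hl]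
  apply List.map_congr_left
  intro k _
  rw [pvFoldApp]
  simp [pvRawAdj]

theorem pvCount_map {β : Type} (g : β → Nat) (ts : List β) (k : Nat) :
    (ts.map g).count k = (ts.filter (fun b => decide (g b = k))).length := by
  induction ts with
  | nil => simp
  | cons b ts ih =>
    simp only [List.map_cons, List.count_cons, List.filter_cons]
    by_cases h : g b = k <;> simp [h, ih]

-- B's inner decrement loop over an adjacency entry
theorem pvDecFold (n : Nat) (ts : List Int) (hts : ∀ j ∈ ts, -(n:Int) ≤ j ∧ j < (n:Int))
    (f : Nat → Int) :
    ts.foldl (fun d j => PySem.List.pySetD d j (PySem.List.pyGetD d j 0 - 1))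
        ((List.range n).map f)
      = (List.range n).map (fun k => f k - ((ts.map (pvPidx n)).count k : Int)) := by
  rw [pvFoldUpd 0 (fun _ a => a - 1) (fun j => j) n ts hts]
  apply List.map_congr_left
  intro k _
  rw [pvFoldSub, pvCount_map]

-- the degree list in the middle of A's inner loop: prefix ts1 of x's targets already processed
def pvMid (n : Nat) (links : List (Int × Int)) (S : Finset Nat) (ts1 : List Int) : List Int :=
  (List.range n).map
    (fun k => (pvDegA (pvNormL n links) S k : Int) - (((ts1.map (pvPidx n)).count k : Nat) : Int))

theorem pvMid_nil (n : Nat) (links : List (Int × Int)) (S : Finset Nat) :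
    pvMid n links S [] = pvMdeg (pvNormL n links) n S := by
  simp [pvMid, pvMdeg]

theorem pvCount_snoc (n : Nat) (ts1 : List Int) (t : Int) (k : Nat) :
    ((ts1 ++ [t]).map (pvPidx n)).count k
      = (ts1.map (pvPidx n)).count k + (if k = pvPidx n t then 1 else 0) := by
  by_cases h : k = pvPidx n t <;>
    simp [List.map_append, List.count_append, List.count_cons, h]
  exact fun hc => absurd hc.symm h

-- A's inner loop: processes the remaining targets ts2, having processed prefix ts1;
-- ap is the list of nodes appended to the worklist so far
theorem pvInnerA (n : Nat) (links : List (Int × Int)) (S : Finset Nat) :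
    ∀ (ts2 ts1 ep ap : List Int),
    (∀ j ∈ ts2, -(n:Int) ≤ j ∧ j < (n:Int)) →
    (∀ j ∈ ap, -(n:Int) ≤ j ∧ j < (n:Int)) →
    (ap.map (pvPidx n)).Nodup →
    (∀ k : Nat, k ∈ ap.map (pvPidx n) ↔
       (1 ≤ pvDegA (pvNormL n links) S k ∧
        pvDegA (pvNormL n links) S k ≤ (ts1.map (pvPidx n)).count k)) →
    ∃ ap2 : List Int,
      ts2.foldl (fun (s : List Int × List Int) nei =>
          if PySem.List.pyGetD s.1 nei 0 - 1 = 0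
          then (PySem.List.pySetD s.1 nei (PySem.List.pyGetD s.1 nei 0 - 1), s.2 ++ [nei])
          else (PySem.List.pySetD s.1 nei (PySem.List.pyGetD s.1 nei 0 - 1), s.2))
        (pvMid n links S ts1, ep ++ ap)
        = (pvMid n links S (ts1 ++ ts2), ep ++ ap2)
      ∧ (∀ j ∈ ap2, -(n:Int) ≤ j ∧ j < (n:Int))
      ∧ (ap2.map (pvPidx n)).Nodup
      ∧ (∀ k : Nat, k ∈ ap2.map (pvPidx n) ↔
          (1 ≤ pvDegA (pvNormL n links) S k ∧
           pvDegA (pvNormL n links) S k ≤ ((ts1 ++ ts2).map (pvPidx n)).count k)) := by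
  intro ts2
  induction ts2 with
  | nil =>
    intro ts1 ep ap h2 hap hnd hch
    exact ⟨ap, by simp, hap, hnd, by simpa using hch⟩
  | cons t ts2 ih =>
    intro ts1 ep ap h2 hap hnd hch
    have ht := h2 t (List.mem_cons_self ..)
    have htn : pvPidx n t < n := pvPidx_lt ht.1 ht.2
    have hmidlen : (pvMid n links S ts1).length = n := by simp [pvMid]
    have hget : PySem.List.pyGetD (pvMid n links S ts1) t 0
        = (pvDegA (pvNormL n links) S (pvPidx n t) : Int)
          - (((ts1.map (pvPidx n)).count (pvPidx n t) : Nat) : Int) := by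
      rw [pvPyGetD_eq _ _ hmidlen ht.1 ht.2]
      unfold pvMid
      rw [pvGetD_map_range _ _ htn]
    have hset : ∀ v : Int, PySem.List.pySetD (pvMid n links S ts1) t v
        = (List.range n).map (fun k => if k = pvPidx n t then v
            else (pvDegA (pvNormL n links) S k : Int)
              - (((ts1.map (pvPidx n)).count k : Nat) : Int)) := by
      intro v
      rw [pvPySetD_eq _ _ hmidlen ht.1 ht.2]
      unfold pvMid
      rw [pvSet_map_range _ _ htn]
    have hmid' : (List.range n).map (fun k =>
          if k = pvPidx n t
          then (pvDegA (pvNormL n links) S (pvPidx n t) : Int)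
              - (((ts1.map (pvPidx n)).count (pvPidx n t) : Nat) : Int) - 1
          else (pvDegA (pvNormL n links) S k : Int)
              - (((ts1.map (pvPidx n)).count k : Nat) : Int))
        = pvMid n links S (ts1 ++ [t]) := by
      unfold pvMid
      apply List.map_congr_left
      intro k _
      rw [pvCount_snoc]
      by_cases h : k = pvPidx n t <;> simp [h] <;> push_cast <;> ring
    simp only [List.foldl_cons, hget, hset, hmid']
    have hts2 : ∀ j ∈ ts2, -(n:Int) ≤ j ∧ j < (n:Int) :=
      fun j hj => h2 j (List.mem_cons_of_mem _ hj)
    by_cases hz : (pvDegA (pvNormL n links) S (pvPidx n t) : Int)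
        - (((ts1.map (pvPidx n)).count (pvPidx n t) : Nat) : Int) - 1 = 0
    · rw [if_pos hz]
      have hdZ : pvDegA (pvNormL n links) S (pvPidx n t)
          = (ts1.map (pvPidx n)).count (pvPidx n t) + 1 := by omega
      have hnotin : pvPidx n t ∉ ap.map (pvPidx n) := by
        intro hmem
        have := (hch (pvPidx n t)).mp hmem
        omega
      have hap' : ∀ j ∈ ap ++ [t], -(n:Int) ≤ j ∧ j < (n:Int) := by
        intro j hj
        rcases List.mem_append.mp hj with h | h
        · exact hap j h
        · rw [List.mem_singleton.mp h]; exact ht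
      have hnd' : ((ap ++ [t]).map (pvPidx n)).Nodup := by
        rw [List.map_append]
        refine List.Nodup.append hnd (by simp) ?_
        intro a ha hb
        simp only [List.map_cons, List.map_nil, List.mem_singleton] at hb
        exact hnotin (hb ▸ ha)
      have hch' : ∀ k : Nat, k ∈ (ap ++ [t]).map (pvPidx n) ↔
          (1 ≤ pvDegA (pvNormL n links) S k ∧
           pvDegA (pvNormL n links) S k ≤ ((ts1 ++ [t]).map (pvPidx n)).count k) := by
        intro k
        rw [List.map_append, List.mem_append, pvCount_snoc]
        by_cases hk : k = pvPidx n t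
        · rw [if_pos hk]
          constructor
          · intro _; rw [hk]; omega
          · intro _; right; simp [hk]
        · rw [if_neg hk]
          simp only [List.map_cons, List.map_nil, List.mem_singleton]
          constructor
          · rintro (h | h)
            · simpa using (hch k).mp h
            · exact absurd h hk
          · intro h; exact Or.inl ((hch k).mpr (by simpa using h))
      have := ih (ts1 ++ [t]) ep (ap ++ [t]) hts2 hap' hnd' hch'
      rcases this with ⟨ap2, heq, hb2, hn2, hc2⟩
      refine ⟨ap2, ?_, hb2, hn2, ?_⟩
      · simpa [List.append_assoc] using heq
      · intro k
        simpa [List.append_assoc] using hc2 k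
    · rw [if_neg hz]
      have hch' : ∀ k : Nat, k ∈ ap.map (pvPidx n) ↔
          (1 ≤ pvDegA (pvNormL n links) S k ∧
           pvDegA (pvNormL n links) S k ≤ ((ts1 ++ [t]).map (pvPidx n)).count k) := by
        intro k
        rw [pvCount_snoc]
        by_cases hk : k = pvPidx n t
        · rw [if_pos hk, hch k, hk]
          omega
        · rw [if_neg hk, hch k]
          omega
      have := ih (ts1 ++ [t]) ep ap hts2 hap hnd hch'
      rcases this with ⟨ap2, heq, hb2, hn2, hc2⟩
      refine ⟨ap2, ?_, hb2, hn2, ?_⟩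
      · simpa [List.append_assoc] using heq
      · intro k
        simpa [List.append_assoc] using hc2 k

theorem pvZ_mem (L : List (Nat × Nat)) (n : Nat) (S : Finset Nat) (k : Nat) :
    k ∈ pvZ L n S ↔ (k < n ∧ k ∉ S ∧ pvDegA L S k = 0) := by
  simp [pvZ, Finset.mem_filter, Finset.mem_range, and_assoc]

theorem pvMid_full (n : Nat) (links : List (Int × Int)) {S : Finset Nat} {x : Nat}
    (hx : x ∉ S) :
    pvMid n links S (pvRawAdj n links x) = pvMdeg (pvNormL n links) n (insert x S) := by
  unfold pvMid pvMdeg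
  apply List.map_congr_left
  intro k _
  exact pvMdeg_dec n links hx k

theorem pvKey (n : Nat) (links : List (Int × Int)) {S : Finset Nat} {x : Nat} (hx : x ∉ S)
    (k : Nat) :
    pvDegA (pvNormL n links) S k
      = pvDegA (pvNormL n links) (insert x S) k
        + ((pvRawAdj n links x).map (pvPidx n)).count k := by
  rw [pvCount_adjN]
  exact pvDegA_insert _ hx k

theorem pvRawAdj_bounds (n : Nat) (links : List (Int × Int))
    (hlinks : ∀ p ∈ links, -(n:Int) ≤ p.1 ∧ p.1 < (n:Int) ∧ -(n:Int) ≤ p.2 ∧ p.2 < (n:Int))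
    (x : Nat) : ∀ j ∈ pvRawAdj n links x, -(n:Int) ≤ j ∧ j < (n:Int) := by
  intro j hj
  rcases List.mem_map.mp hj with ⟨p, hp, rfl⟩
  have := hlinks p (List.mem_of_mem_filter hp)
  exact ⟨this.2.2.1, this.2.2.2⟩

theorem pvLoopA_spec (n : Nat) (links : List (Int × Int))
    (hlinks : ∀ p ∈ links, -(n:Int) ≤ p.1 ∧ p.1 < (n:Int) ∧ -(n:Int) ≤ p.2 ∧ p.2 < (n:Int)) :
    ∀ (fuel : Nat) (S : Finset Nat) (ep : List Int),
    PvPeel (pvNormL n links) n S →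
    (∀ j ∈ ep, -(n:Int) ≤ j ∧ j < (n:Int)) →
    (ep.map (pvPidx n)).Nodup →
    (∀ k : Nat, k ∈ ep.map (pvPidx n) ↔ k ∈ pvZ (pvNormL n links) n S) →
    n - S.card ≤ fuel →
    ∃ T, PvPeel (pvNormL n links) n T ∧ pvClosed (pvNormL n links) n T ∧
      pvLoopA ((List.range n).map (pvRawAdj n links)) fuel (pvMdeg (pvNormL n links) n S) ep
        = pvMdeg (pvNormL n links) n T := by
  intro fuel
  induction fuel with
  | zero =>
    intro S ep hPeel hb hnd hch hfuel
    refine ⟨S, hPeel, ?_, rfl⟩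
    have hsub : S ⊆ Finset.range n :=
      fun x hx => Finset.mem_range.mpr (pvPeel_subset_range _ _ hPeel x hx)
    have hcard : S.card ≤ n := by
      simpa using Finset.card_le_card hsub
    have hS : S = Finset.range n :=
      Finset.eq_of_subset_of_card_le hsub (by simp; omega) |>.symm.symm
    intro i hi _
    rw [hS]
    exact Finset.mem_range.mpr hi
  | succ fuel ih =>
    intro S ep hPeel hb hnd hch hfuel
    by_cases hep : ep = []
    · subst hep
      refine ⟨S, hPeel, ?_, by simp [pvLoopA]⟩
      intro i hi hdeg
      by_contra hiS
      have : i ∈ pvZ (pvNormL n links) n S := (pvZ_mem _ _ _ _).mpr ⟨hi, hiS, hdeg⟩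
      simpa using (hch i).mpr this
    · -- pop the last element x
      have hlast : PySem.List.pyGetD ep (-1) 0 = ep.getLast hep :=
        PySem.List.pyGetD_neg_one ep 0 hep
      set x := ep.getLast hep with hxdef
      have hxep : x ∈ ep := List.getLast_mem hep
      have hxb := hb x hxep
      have hxn : pvPidx n x < n := pvPidx_lt hxb.1 hxb.2
      have hxZ : pvPidx n x ∈ pvZ (pvNormL n links) n S :=
        (hch _).mp (List.mem_map_of_mem hxep)
      rcases (pvZ_mem _ _ _ _).mp hxZ with ⟨_, hxS, hxdeg⟩
      have hli : PySem.List.pyGetD ((List.range n).map (pvRawAdj n links)) x []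
          = pvRawAdj n links (pvPidx n x) := by
        rw [pvPyGetD_eq _ _ (by simp) hxb.1 hxb.2, pvGetD_map_range _ _ hxn]
      have hepd : ep = ep.dropLast ++ [x] := (List.dropLast_append_getLast hep).symm
      have hndsplit : (ep.dropLast.map (pvPidx n)).Nodup ∧
          pvPidx n x ∉ ep.dropLast.map (pvPidx n) := by
        rw [hepd] at hnd
        rw [List.map_append] at hnd
        rcases List.nodup_append.mp hnd with ⟨h1, h2, h3⟩
        exact ⟨h1, fun hmem => h3 _ hmem (pvPidx n x) (by simp) rfl⟩
      rcases pvInnerA n links S (pvRawAdj n links (pvPidx n x)) [] ep.dropLast []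
          (pvRawAdj_bounds n links hlinks _) (by simp) (by simp)
          (by intro k; simp; omega) with ⟨ap2, heq, hb2, hn2, hc2⟩
      rw [pvMid_nil, List.append_nil, List.nil_append, pvMid_full n links hxS] at heq
      simp only [List.nil_append] at hc2
      have hPeel' : PvPeel (pvNormL n links) n (insert (pvPidx n x) S) :=
        PvPeel.step hPeel hxn hxS hxdeg
      have hb' : ∀ j ∈ ep.dropLast ++ ap2, -(n:Int) ≤ j ∧ j < (n:Int) := by
        intro j hj
        rcases List.mem_append.mp hj with h | h
        · exact hb j (by rw [hepd]; exact List.mem_append_left _ h)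
        · exact hb2 j h
      have hZS : ∀ k, k ∈ ep.dropLast.map (pvPidx n) → k ∈ pvZ (pvNormL n links) n S := by
        intro k hk
        apply (hch k).mp
        rw [hepd, List.map_append]
        exact List.mem_append_left _ hk
      have hdisj : ∀ k, k ∈ ep.dropLast.map (pvPidx n) → k ∉ ap2.map (pvPidx n) := by
        intro k hk hk2
        have h1 := (pvZ_mem _ _ _ _).mp (hZS k hk)
        have h2 := (hc2 k).mp hk2
        omega
      have hnd' : ((ep.dropLast ++ ap2).map (pvPidx n)).Nodup := by
        rw [List.map_append]
        exact List.Nodup.append hndsplit.1 hn2 hdisj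
      have hch' : ∀ k : Nat, k ∈ (ep.dropLast ++ ap2).map (pvPidx n) ↔
          k ∈ pvZ (pvNormL n links) n (insert (pvPidx n x) S) := by
        intro k
        rw [List.map_append, List.mem_append, pvZ_mem]
        constructor
        · rintro (h | h)
          · rcases (pvZ_mem _ _ _ _).mp (hZS k h) with ⟨h1, h2, h3⟩
            refine ⟨h1, ?_, ?_⟩
            · simp only [Finset.mem_insert]
              rintro (rfl | hc)
              · exact hndsplit.2 h
              · exact h2 hc
            · have := pvDegA_mono (pvNormL n links) (Finset.subset_insert (pvPidx n x) S) k
              omega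
          · have hck := (hc2 k).mp h
            have hkey := pvKey n links hxS k
            refine ⟨?_, ?_, by omega⟩
            · rcases List.mem_map.mp h with ⟨j, hj, rfl⟩
              exact pvPidx_lt (hb2 j hj).1 (hb2 j hj).2
            · simp only [Finset.mem_insert]
              rintro (rfl | hc)
              · omega
              · have := pvPeel_deg_zero _ _ hPeel k hc
                omega
        · rintro ⟨h1, h2, h3⟩
          simp only [Finset.mem_insert] at h2
          push_neg at h2
          have hkey := pvKey n links hxS k
          by_cases hds : pvDegA (pvNormL n links) S k = 0
          · left
            have : k ∈ ep.map (pvPidx n) := (hch k).mpr ((pvZ_mem _ _ _ _).mpr ⟨h1, h2.2, hds⟩)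
            rw [hepd, List.map_append] at this
            rcases List.mem_append.mp this with h | h
            · exact h
            · simp only [List.map_cons, List.map_nil, List.mem_singleton] at h
              exact absurd h h2.1
          · right
            exact (hc2 k).mpr (by omega)
      have hcard : n - (insert (pvPidx n x) S).card ≤ fuel := by
        rw [Finset.card_insert_of_notMem hxS]
        omega
      rcases ih (insert (pvPidx n x) S) (ep.dropLast ++ ap2) hPeel' hb' hnd' hch' hcard
        with ⟨T, hT1, hT2, hT3⟩
      refine ⟨T, hT1, hT2, ?_⟩
      simp only [pvLoopA, if_neg hep]
      rw [hlast, hli, heq]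
      exact hT3

-- the removed-flags list as a function of the removed set S
def pvRm (n : Nat) (S : Finset Nat) : List Bool :=
  (List.range n).map (fun k => decide (k ∈ S))

-- one round of B: peel every node of the collected zero list in turn
theorem pvRoundB (n : Nat) (links : List (Int × Int))
    (hlinks : ∀ p ∈ links, -(n:Int) ≤ p.1 ∧ p.1 < (n:Int) ∧ -(n:Int) ≤ p.2 ∧ p.2 < (n:Int)) :
    ∀ (rest : List Nat) (S' : Finset Nat), PvPeel (pvNormL n links) n S' →
    (∀ k ∈ rest, k < n ∧ k ∉ S' ∧ pvDegA (pvNormL n links) S' k = 0) →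
    rest.Nodup →
    rest.foldl (fun (s : List Int × List Bool) (k : Nat) =>
        ((PySem.List.pyGetD ((List.range n).map (pvRawAdj n links)) (k : Int) []).foldl
            (fun d j => PySem.List.pySetD d j (PySem.List.pyGetD d j 0 - 1)) s.1,
         PySem.List.pySetD s.2 (k : Int) true))
      (pvMdeg (pvNormL n links) n S', pvRm n S')
      = (pvMdeg (pvNormL n links) n (S' ∪ rest.toFinset), pvRm n (S' ∪ rest.toFinset))
      ∧ PvPeel (pvNormL n links) n (S' ∪ rest.toFinset) := by
  intro rest
  induction rest with
  | nil =>
    intro S' hPeel _ _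
    simpa using hPeel
  | cons k rest ih =>
    intro S' hPeel hmem hnd
    have hk := hmem k (List.mem_cons_self ..)
    have hPeel' : PvPeel (pvNormL n links) n (insert k S') :=
      PvPeel.step hPeel hk.1 hk.2.1 hk.2.2
    have hadj : PySem.List.pyGetD ((List.range n).map (pvRawAdj n links)) (k : Int) []
        = pvRawAdj n links k := by
      rw [PySem.List.pyGetD_natCast]
      exact pvGetD_map_range _ _ hk.1
    have hdeg : (pvRawAdj n links k).foldl
          (fun d j => PySem.List.pySetD d j (PySem.List.pyGetD d j 0 - 1))
          (pvMdeg (pvNormL n links) n S')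
        = pvMdeg (pvNormL n links) n (insert k S') := by
      unfold pvMdeg
      rw [pvDecFold n _ (pvRawAdj_bounds n links hlinks k)]
      apply List.map_congr_left
      intro j _
      exact pvMdeg_dec n links hk.2.1 j
    have hrm : PySem.List.pySetD (pvRm n S') (k : Int) true = pvRm n (insert k S') := by
      rw [PySem.List.pySetD_natCast]
      unfold pvRm
      rw [pvSet_map_range _ _ hk.1]
      apply List.map_congr_left
      intro j _
      by_cases h : j = k <;> simp [h, Finset.mem_insert]
    have hmem' : ∀ k' ∈ rest, k' < n ∧ k' ∉ insert k S'
        ∧ pvDegA (pvNormL n links) (insert k S') k' = 0 := by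
      intro k' hk'
      have h1 := hmem k' (List.mem_cons_of_mem _ hk')
      refine ⟨h1.1, ?_, ?_⟩
      · simp only [Finset.mem_insert]
        rintro (rfl | hc)
        · exact (List.nodup_cons.mp hnd).1 hk'
        · exact h1.2.1 hc
      · have := pvDegA_mono (pvNormL n links) (Finset.subset_insert k S') k'
        omega
    have := ih (insert k S') hPeel' hmem' (List.nodup_cons.mp hnd).2
    rw [List.foldl_cons]
    simp only [hadj, hdeg, hrm]
    have hset : insert k S' ∪ rest.toFinset = S' ∪ (k :: rest).toFinset := by
      ext a
      simp only [Finset.mem_union, Finset.mem_insert, List.toFinset_cons, List.mem_toFinset]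
      tauto
    rw [hset] at this
    exact this

theorem pvLoopB_spec (n : Nat) (links : List (Int × Int))
    (hlinks : ∀ p ∈ links, -(n:Int) ≤ p.1 ∧ p.1 < (n:Int) ∧ -(n:Int) ≤ p.2 ∧ p.2 < (n:Int)) :
    ∀ (fuel : Nat) (S : Finset Nat),
    PvPeel (pvNormL n links) n S →
    n + 1 - S.card ≤ fuel →
    ∃ T, PvPeel (pvNormL n links) n T ∧ pvClosed (pvNormL n links) n T ∧
      pvLoopB ((List.range n).map (pvRawAdj n links)) (n : Int) fuel
          (pvMdeg (pvNormL n links) n S) (pvRm n S)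
        = pvMdeg (pvNormL n links) n T := by
  intro fuel
  induction fuel with
  | zero =>
    intro S hPeel hfuel
    exfalso
    have hsub : S ⊆ Finset.range n :=
      fun x hx => Finset.mem_range.mpr (pvPeel_subset_range _ _ hPeel x hx)
    have := Finset.card_le_card hsub
    simp only [Finset.card_range] at this
    omega
  | succ fuel ih =>
    intro S hPeel hfuel
    have hzeros : (PySem.List.pyRange 0 (n:Int) 1).filter
          (fun i => !(PySem.List.pyGetD (pvRm n S) i false)
            && decide (PySem.List.pyGetD (pvMdeg (pvNormL n links) n S) i 0 = 0))
        = ((List.range n).filter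
            (fun k => !decide (k ∈ S) && decide (pvDegA (pvNormL n links) S k = 0))).map
            (fun k : Nat => (k : Int)) := by
      rw [PySem.List.pyRange_zero_natCast, List.filter_map]
      refine congrArg (List.map fun k : Nat => (k : Int)) ?_
      apply List.filter_congr
      intro k hk
      have hkn : k < n := List.mem_range.mp hk
      simp only [Function.comp_apply, PySem.List.pyGetD_natCast]
      unfold pvRm pvMdeg
      rw [pvGetD_map_range _ _ hkn, pvGetD_map_range _ _ hkn]
      simp
    set zerosN := (List.range n).filter
        (fun k => !decide (k ∈ S) && decide (pvDegA (pvNormL n links) S k = 0)) with hzN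
    by_cases hz : zerosN = []
    · refine ⟨S, hPeel, ?_, ?_⟩
      · intro i hi hdeg
        by_contra hiS
        have : i ∈ zerosN := by
          rw [hzN]
          simp [List.mem_filter, List.mem_range, hi, hiS, hdeg]
        rw [hz] at this
        simp at this
      · simp only [pvLoopB, hzeros, hz]
        simp
    · simp only [pvLoopB, hzeros]
      rw [if_neg (by simpa using hz)]
      rw [List.foldl_map]
      have hmem : ∀ k ∈ zerosN, k < n ∧ k ∉ S ∧ pvDegA (pvNormL n links) S k = 0 := by
        intro k hk
        rw [hzN] at hk
        rcases List.mem_filter.mp hk with ⟨h1, h2⟩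
        simp only [Bool.and_eq_true, Bool.not_eq_true', decide_eq_false_iff_not,
          decide_eq_true_eq] at h2
        exact ⟨List.mem_range.mp h1, h2.1, h2.2⟩
      have hround := pvRoundB n links hlinks zerosN S hPeel hmem
        (List.Nodup.filter _ (List.nodup_range))
      rcases hround with ⟨hfold, hPeel'⟩
      have hcard : n + 1 - (S ∪ zerosN.toFinset).card ≤ fuel := by
        rcases List.exists_mem_of_ne_nil zerosN hz with ⟨z, hzmem⟩
        have hzS : z ∉ S := (hmem z hzmem).2.1
        have hss : S ⊂ S ∪ zerosN.toFinset := by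
          refine (Finset.ssubset_iff_of_subset Finset.subset_union_left).mpr ?_
          exact ⟨z, Finset.mem_union_right _ (List.mem_toFinset.mpr hzmem), hzS⟩
        have := Finset.card_lt_card hss
        omega
      rcases ih (S ∪ zerosN.toFinset) hPeel' hcard with ⟨T, hT1, hT2, hT3⟩
      refine ⟨T, hT1, hT2, ?_⟩
      rw [hfold]
      exact hT3

theorem pvEnum {α : Type} (f : Nat → α) (n : Nat) (d : α) :
    PySem.List.enumerate ((List.range n).map f) 0
      = (List.range n).map (fun k : Nat => ((k : Int), f k)) := by
  rw [PySem.List.enumerate_eq_map_pyRange (d := d)]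
  have hlen : PySem.List.len ((List.range n).map f) = (n : Int) := by
    simp [PySem.List.len]
  rw [hlen, PySem.List.pyRange_zero_natCast, List.map_map]
  apply List.map_congr_left
  intro k hk
  have hkn : k < n := List.mem_range.mp hk
  simp only [Function.comp_apply, PySem.List.pyGetD_natCast]
  rw [pvGetD_map_range _ _ hkn]

theorem pvEnumFilter {α : Type} (n : Nat) (f : Nat → α) (d : α) (pred : α → Bool) :
    ((PySem.List.enumerate ((List.range n).map f) 0).filter (fun p => pred p.2)).map
        (fun p => p.1)
      = ((List.range n).filter (fun k => pred (f k))).map (fun k : Nat => (k : Int)) := by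
  rw [pvEnum f n d, List.filter_map, List.map_map]
  simp [Function.comp_def]

theorem pvOutB (n : Nat) (f : Nat → Int) :
    (PySem.List.pyRange 0 (n : Int) 1).filter
        (fun i => decide (0 < PySem.List.pyGetD ((List.range n).map f) i 0))
      = ((List.range n).filter (fun k => decide (0 < f k))).map (fun k : Nat => (k : Int)) := by
  rw [PySem.List.pyRange_zero_natCast, List.filter_map]
  refine congrArg (List.map fun k : Nat => (k : Int)) ?_
  apply List.filter_congr
  intro k hk
  have hkn : k < n := List.mem_range.mp hk
  simp only [Function.comp_apply, PySem.List.pyGetD_natCast]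
  rw [pvGetD_map_range _ _ hkn]

theorem pvMain (links : List (Int × Int)) (len_n : Int)
    (hne : len_n ≠ -1)
    (hbnd : ∀ p ∈ links, (-len_n ≤ p.1 ∧ p.1 < len_n ∧ -len_n ≤ p.2 ∧ p.2 < len_n)) :
    cut_all_branch links len_n = cut_all_branch_alt links len_n := by
  by_cases hneg : len_n < 0
  · -- all link endpoints would be out of range, so links is empty and both sides are []
    have hnil : links = [] := by
      cases links with
      | nil => rfl
      | cons p l =>
        have := hbnd p (List.mem_cons_self ..)
        omega
    subst hnil
    have ht : len_n.toNat = 0 := Int.toNat_of_nonpos (le_of_lt hneg)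
    have hr : (len_n - 0).toNat = 0 := by omega
    simp [cut_all_branch, cut_all_branch_alt, pvLink, pvLoopA, pvLoopB, ht, hne,
      PySem.List.enumerate, PySem.List.pyRange_one, hr]
  · push_neg at hneg
    lift len_n to Nat using hneg with n hn
    have hlinks : ∀ p ∈ links,
        -(n:Int) ≤ p.1 ∧ p.1 < (n:Int) ∧ -(n:Int) ≤ p.2 ∧ p.2 < (n:Int) := by
      intro p hp
      have := hbnd p hp
      omega
    have hAdeg : links.foldl
          (fun deg p => PySem.List.pySetD deg p.2 (PySem.List.pyGetD deg p.2 0 + 1))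
          (List.replicate ((n:Int)).toNat (0:Int))
        = pvMdeg (pvNormL n links) n ∅ := by
      rw [Int.toNat_natCast]
      exact pvBuildDeg n links (fun p hp => ⟨(hlinks p hp).2.2.1, (hlinks p hp).2.2.2⟩)
    have hLi : pvLink links (n:Int) = (List.range n).map (pvRawAdj n links) := by
      unfold pvLink
      rw [if_neg hne]
      simp only [Int.toNat_natCast]
      exact pvBuildAdj n links (fun p hp => ⟨(hlinks p hp).1, (hlinks p hp).2.1⟩)
    -- initial worklist
    have hEp : ((PySem.List.enumerate (pvMdeg (pvNormL n links) n ∅) 0).filter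
          (fun p => decide (p.2 = 0))).map (fun p => p.1)
        = ((List.range n).filter
            (fun k => decide (((pvDegA (pvNormL n links) ∅ k : Nat) : Int) = 0))).map
            (fun k : Nat => (k : Int)) := by
      unfold pvMdeg
      exact pvEnumFilter n _ 0 (fun v => decide (v = 0))
    set epN := (List.range n).filter
        (fun k => decide (((pvDegA (pvNormL n links) ∅ k : Nat) : Int) = 0)) with hepN
    have hepNmem : ∀ k, k ∈ epN ↔ (k < n ∧ pvDegA (pvNormL n links) ∅ k = 0) := by
      intro k
      rw [hepN]
      simp [List.mem_filter, List.mem_range, Int.natCast_eq_zero]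
    rcases pvLoopA_spec n links hlinks n ∅ (epN.map (fun k : Nat => (k : Int)))
        PvPeel.nil
        (by
          intro j hj
          rcases List.mem_map.mp hj with ⟨k, hk, rfl⟩
          have := ((hepNmem k).mp hk).1
          omega)
        (by
          rw [List.map_map]
          have : ((fun i : Int => pvPidx n i) ∘ fun k : Nat => (k : Int)) = id := by
            funext k
            simp [pvPidx_natCast]
          rw [this, List.map_id]
          exact List.Nodup.filter _ List.nodup_range)
        (by
          intro k
          rw [List.map_map]
          have : ((fun i : Int => pvPidx n i) ∘ fun k : Nat => (k : Int)) = id := by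
            funext k
            simp [pvPidx_natCast]
          rw [this, List.map_id, pvZ_mem, hepNmem]
          simp)
        (by simp)
      with ⟨T, hT1, hT2, hT3⟩
    rcases pvLoopB_spec n links hlinks (n+1) ∅ PvPeel.nil (by simp)
      with ⟨T', hT1', hT2', hT3'⟩
    have hTT : T = T' := pvUnique _ _ hT1 hT2 hT1' hT2'
    subst hTT
    -- now unfold both programs
    show cut_all_branch links (n:Int) = cut_all_branch_alt links (n:Int)
    simp only [cut_all_branch, cut_all_branch_alt]
    rw [PySem.List.foldl_prod_mk
      (f := fun (deg : List Int) (p : Int × Int) =>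
        PySem.List.pySetD deg p.2 (PySem.List.pyGetD deg p.2 0 + 1))
      (g := fun (li : List (List Int)) (p : Int × Int) =>
        PySem.List.pySetD li p.1 (PySem.List.pyGetD li p.1 [] ++ [p.2]))]
    simp only [Int.toNat_natCast] at *
    have hrm0 : List.replicate n false = pvRm n (∅ : Finset Nat) := by
      rw [pvReplicate]
      unfold pvRm
      simp
    simp only [hAdeg, hLi, hEp,
      pvBuildDeg n links (fun p hp => ⟨(hlinks p hp).2.2.1, (hlinks p hp).2.2.2⟩),
      pvBuildAdj n links (fun p hp => ⟨(hlinks p hp).1, (hlinks p hp).2.1⟩),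
      hrm0, hT3, hT3']
    -- the two result comprehensions agree
    conv_lhs => rw [pvMdeg]
    rw [pvEnumFilter n _ 0 (fun v => decide (0 < v))]
    conv_rhs => rw [pvMdeg]
    rw [pvOutB n _]

-- ===== VERDICT (by name: the statement is the Claim_ definition above) =====
theorem cut_all_branch_spec : Claim_equal_cut_all_branch := by
  intro links len_n _ hPre
  unfold Spec_cut_all_branch
  exact pvMain links len_n hPre.1 hPre.2

theorem cut_all_branch_raises : Claim_raises_cut_all_branch := by
  unfold Claim_raises_cut_all_branch
  exact ⟨fun links len_n _ hr hp => hp.1 hr.2, by decide⟩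

-- self-check of the crash-fix claim at its witness (corollary of cut_all_branch_raises)
theorem pvRaiseWitnessOut_ok :
    cut_all_branch_alt (pvRaiseWitness_cut_all_branch.1) (pvRaiseWitness_cut_all_branch.2)
      = pvRaiseWitnessOut_cut_all_branch := by
  have h := cut_all_branch_raises
  unfold Claim_raises_cut_all_branch at h
  exact h.2.2.2
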